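/- GENERATED by farm/worked/mk_tree_copies.py from farm/worked/vorbis_decode_initial.COMPOSITION/Proof.lean (a worked proof of the farm's unit `vorbis_decode_initial.COMPOSITION`,
   accepted by the verdict) — do not edit. -/
import Vorbis.Spec.Units.vorbis_decode_initial_COMPOSITION

/- THE COMPOSITION OF vorbis_decode_initial (in the farm's format): the nine segment statements give the function's contract, by
   `ReachVia.trans` and, for the retry loop (`loop1`, segment 2) with the drain loop nested in it (`loop2`, segment 3), ONE strong
   induction on a bound `m` of the paging measure μ of the present memory: a round of the retry loop that goes on enters the drain loop
   with μ strictly smaller; a round of the drain loop comes back to it with μ strictly smaller, or leaves it for the head of the retry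
   loop with μ not larger. No machine code is walked. -/
open X86 X86.User Asan Vorbis Vorbis.Spec

namespace Vorbis.Spec.Worked.vorbis_decode_initial_COMPOSITION
open Vorbis.Spec.vorbis_decode_initial_COMPOSITION (Statement)

/-- From the epilogue the function returns: segment 9. -/
theorem di_from_end_w {Lay : Layout} {μ : Microarch} {u₀ : State}
    (hseg9 : vorbis_decode_initial.Seg9 Lay μ u₀)
    (others : List Obj) (frames : List (Nat × FrameLayout)) (len : Nat) (A : Arena) (stored room : Int) (ysz : Nat → Nat)
    (u : State) (ret : Word)
    (hE : vorbis_decode_initial.IEntered others frames len A stored room ysz u₀ u ret) (v : State)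
    (hv : vorbis_decode_initial.IAtEnd (RunBlk A len) len u₀ u ret v) :
    ReachVia Lay μ WayInv v
      (Returned (conv u₀) (vorbis_decode_initial.spec others frames len A stored room ysz) u ret) :=
  hseg9 others frames len A stored room ysz u ret v hE hv

/-- From `ret12` (the mode is stored) the function returns: segments 6, 7, 8, 9 in a row. -/
theorem di_from_mode_w {Lay : Layout} {μ : Microarch} {u₀ : State}
    (hseg6 : vorbis_decode_initial.Seg6 Lay μ u₀) (hseg7 : vorbis_decode_initial.Seg7 Lay μ u₀)
    (hseg8 : vorbis_decode_initial.Seg8 Lay μ u₀) (hseg9 : vorbis_decode_initial.Seg9 Lay μ u₀)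
    (others : List Obj) (frames : List (Nat × FrameLayout)) (len : Nat) (A : Arena) (stored room : Int) (ysz : Nat → Nat)
    (u : State) (ret : Word)
    (hE : vorbis_decode_initial.IEntered others frames len A stored room ysz u₀ u ret) (i : Nat) (v : State)
    (hv : vorbis_decode_initial.IAtM L.vorbis_decode_initial.ret12 (RunBlk A len) len u₀ u ret i v) :
    ReachVia Lay μ WayInv v
      (Returned (conv u₀) (vorbis_decode_initial.spec others frames len A stored room ysz) u ret) := by
  apply (hseg6 others frames len A stored room ysz u ret i v hE hv).trans
  intro w hw
  obtain ⟨bf, n, hwin⟩ := hw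
  apply (hseg7 others frames len A stored room ysz u ret i bf n w hE hwin).trans
  intro x hx
  apply (hseg8 others frames len A stored room ysz u ret i bf n x hE hx).trans
  intro y hy
  exact di_from_end_w hseg9 others frames len A stored room ysz u ret hE y hy

/-- From the exit `at_1131fa` of the retry loop (ebp = 0) the function returns: segments 4 and 5, then the epilogue or the rest. -/
theorem di_from_mid_w {Lay : Layout} {μ : Microarch} {u₀ : State}
    (hseg4 : vorbis_decode_initial.Seg4 Lay μ u₀) (hseg5 : vorbis_decode_initial.Seg5 Lay μ u₀)
    (hseg6 : vorbis_decode_initial.Seg6 Lay μ u₀) (hseg7 : vorbis_decode_initial.Seg7 Lay μ u₀)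
    (hseg8 : vorbis_decode_initial.Seg8 Lay μ u₀) (hseg9 : vorbis_decode_initial.Seg9 Lay μ u₀)
    (others : List Obj) (frames : List (Nat × FrameLayout)) (len : Nat) (A : Arena) (stored room : Int) (ysz : Nat → Nat)
    (u : State) (ret : Word)
    (hE : vorbis_decode_initial.IEntered others frames len A stored room ysz u₀ u ret) (v : State)
    (hv : vorbis_decode_initial.IAt L.vorbis_decode_initial.at_1131fa (RunBlk A len) len u₀ u ret v)
    (hrbp : v.reg .rbp = 0) :
    ReachVia Lay μ WayInv v
      (Returned (conv u₀) (vorbis_decode_initial.spec others frames len A stored room ysz) u ret) := by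
  apply (hseg4 others frames len A stored room ysz u ret v hE hv hrbp).trans
  intro w hw
  apply (hseg5 others frames len A stored room ysz u ret w hE hw.1 hw.2.1 hw.2.2).trans
  intro x hx
  rcases hx with hend | ⟨i, hm⟩
  · exact di_from_end_w hseg9 others frames len A stored room ysz u ret hE x hend
  · exact di_from_mode_w hseg6 hseg7 hseg8 hseg9 others frames len A stored room ysz u ret hE i x hm

/-- From either loop head the function returns, for every bound `m` of μ of the present memory: strong induction on `m`. The head
`loop1` first (segment 2: the epilogue, the exit of the loop, or the drain loop with μ smaller: the induction hypothesis), then the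
head `loop2` (segment 3: the drain loop again with μ smaller: the induction hypothesis; or `loop1` with μ not larger: the first
half, just proved for this `m`). -/
theorem di_from_loops_w {Lay : Layout} {μ : Microarch} {u₀ : State}
    (hseg2 : vorbis_decode_initial.Seg2 Lay μ u₀) (hseg3 : vorbis_decode_initial.Seg3 Lay μ u₀)
    (hseg4 : vorbis_decode_initial.Seg4 Lay μ u₀) (hseg5 : vorbis_decode_initial.Seg5 Lay μ u₀)
    (hseg6 : vorbis_decode_initial.Seg6 Lay μ u₀) (hseg7 : vorbis_decode_initial.Seg7 Lay μ u₀)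
    (hseg8 : vorbis_decode_initial.Seg8 Lay μ u₀) (hseg9 : vorbis_decode_initial.Seg9 Lay μ u₀)
    (others : List Obj) (frames : List (Nat × FrameLayout)) (len : Nat) (A : Arena) (stored room : Int) (ysz : Nat → Nat)
    (u : State) (ret : Word)
    (hE : vorbis_decode_initial.IEntered others frames len A stored room ysz u₀ u ret) :
    ∀ (m : Nat),
      (∀ (v : State), vorbis_decode_initial.IAt L.vorbis_decode_initial.loop1 (RunBlk A len) len u₀ u ret v →
        mu v.mem (u.reg .rdi).toNat ≤ m →
        ReachVia Lay μ WayInv v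
          (Returned (conv u₀) (vorbis_decode_initial.spec others frames len A stored room ysz) u ret)) ∧
      (∀ (v : State), vorbis_decode_initial.IAt L.vorbis_decode_initial.loop2 (RunBlk A len) len u₀ u ret v →
        mu v.mem (u.reg .rdi).toNat ≤ m →
        ReachVia Lay μ WayInv v
          (Returned (conv u₀) (vorbis_decode_initial.spec others frames len A stored room ysz) u ret)) := by
  intro m
  induction m using Nat.strongRecOn with
  | ind m ih =>
    -- the head of the retry loop, for this bound
    have hhead : ∀ (v : State), vorbis_decode_initial.IAt L.vorbis_decode_initial.loop1 (RunBlk A len) len u₀ u ret v →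
        mu v.mem (u.reg .rdi).toNat ≤ m →
        ReachVia Lay μ WayInv v
          (Returned (conv u₀) (vorbis_decode_initial.spec others frames len A stored room ysz) u ret) := by
      intro v hv hle
      apply (hseg2 others frames len A stored room ysz u ret v hE hv).trans
      intro w hw
      rcases hw with hend | ⟨hmid, hrbp⟩ | ⟨hdrain, hlt⟩
      · exact di_from_end_w hseg9 others frames len A stored room ysz u ret hE w hend
      · exact di_from_mid_w hseg4 hseg5 hseg6 hseg7 hseg8 hseg9 others frames len A stored room ysz u ret hE w hmid hrbp
      · exact (ih (mu w.mem (u.reg .rdi).toNat) (by omega)).2 w hdrain (Nat.le_refl _)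
    refine ⟨hhead, ?_⟩
    -- the head of the drain loop, for this bound
    intro v hv hle
    apply (hseg3 others frames len A stored room ysz u ret v hE hv).trans
    intro w hw
    rcases hw with ⟨hretry, hle'⟩ | ⟨hdrain, hlt⟩
    · exact hhead w hretry (by omega)
    · exact (ih (mu w.mem (u.reg .rdi).toNat) (by omega)).2 w hdrain (Nat.le_refl _)

end Vorbis.Spec.Worked.vorbis_decode_initial_COMPOSITION

theorem Vorbis.Spec.Worked.vorbis_decode_initial_COMPOSITION_ok : Vorbis.Spec.vorbis_decode_initial_COMPOSITION.Statement := by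
  intro Lay hLay μ hμ u₀ hseg1 hseg2 hseg3 hseg4 hseg5 hseg6 hseg7 hseg8 hseg9 others frames len A stored room ysz u ret he hpre
  have hE : Vorbis.Spec.vorbis_decode_initial.IEntered others frames len A stored room ysz u₀ u ret := ⟨he, hpre⟩
  apply (hseg1 others frames len A stored room ysz u ret hE).trans
  intro v hv
  exact (Vorbis.Spec.Worked.vorbis_decode_initial_COMPOSITION.di_from_loops_w hseg2 hseg3 hseg4 hseg5 hseg6 hseg7 hseg8 hseg9
    others frames len A stored room ysz u ret hE (mu v.mem (u.reg .rdi).toNat)).1 v hv (Nat.le_refl _)
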